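-- pv_equiv track=rewrite | github.com/ryeongee/problem-solving | PythonAlgorithmInterview/LinkedList.py | isPalindromeList
-- ===== SOURCE A (Python) =====
-- def isPalindromeList(head) -> bool:
--     q = []
--     if not head:
--         return True
--     node = head
--     i = 0
--     while(node is not None):
--         if(i == len(head)):
--             break
--         q.append(node[i])
--         i += 1
--
--     while len(q) > 1:
--         if q.pop(0) != q.pop():
--             return False
--     return True
-- ===== SOURCE B (Python) =====
-- def isPalindromeList(head) -> bool:
--     return head == head[::-1]
-- ===== Notes on version B (the rewrite author's own statement) =====
-- stated objective: faster
-- what changed: Replaced the copy-then-repeated pop(0)/pop() scan (pop(0) is O(n) per step) with a single reversed-list comparison head == head[::-1].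
import Mathlib
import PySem

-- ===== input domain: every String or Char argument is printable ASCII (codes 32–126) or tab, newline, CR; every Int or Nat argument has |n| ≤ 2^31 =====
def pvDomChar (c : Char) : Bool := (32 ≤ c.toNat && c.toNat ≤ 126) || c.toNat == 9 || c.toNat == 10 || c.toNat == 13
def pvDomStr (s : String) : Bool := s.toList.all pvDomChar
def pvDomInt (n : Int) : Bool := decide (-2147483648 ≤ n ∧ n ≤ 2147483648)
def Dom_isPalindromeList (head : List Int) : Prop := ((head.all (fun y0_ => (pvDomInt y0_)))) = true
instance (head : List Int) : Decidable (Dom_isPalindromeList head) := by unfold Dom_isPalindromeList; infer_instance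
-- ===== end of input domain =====

-- B replaces A's copy-then-repeated-pop(0)/pop() scan with a single reversed-list comparison (objective: faster, as measured).

-- ===== PORT A =====
-- second while loop: `while len(q) > 1: if q.pop(0) != q.pop(): return False` ; `return True`.
-- q.pop(0) is the head, q.pop() is the last element of the remainder; recursion on the middle part.
def pvPopLoop : List Int → Bool
  | [] => true
  | [_] => true
  | a :: b :: rest =>
      if a ≠ (b :: rest).getLast (by simp) then false
      else pvPopLoop (b :: rest).dropLast
termination_by q => q.length
decreasing_by simp [List.length_dropLast]

def isPalindromeList (head : List Int) : Bool :=
  -- q = []; if not head: return True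
  if head = [] then true
  else
    -- node = head; i = 0; while node is not None: if i == len(head): break; q.append(node[i]); i += 1
    -- node never changes, so the loop runs i = 0 .. len(head)-1 and breaks; node[i] is in range.
    let q : List Int := (PySem.List.pyRange 0 (PySem.List.len head) 1).foldl
      (fun q i => q ++ [PySem.List.pyGetD head i 0]) []
    pvPopLoop q

-- ===== PORT B =====
def isPalindromeList_alt (head : List Int) : Bool :=
  -- return head == head[::-1]   (step -1 slice never raises, hence getD)
  head == (PySem.List.slice? head none none (-1)).getD []

-- ===== PRECONDITION & SPEC =====
def Spec_isPalindromeList (head : List Int) (out : Bool) : Prop := out = isPalindromeList_alt head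
instance (head : List Int) (out : Bool) : Decidable (Spec_isPalindromeList head out) := by unfold Spec_isPalindromeList; infer_instance

-- ===== CLAIM (what is proved, stated in full; the proofs are below) =====
def Claim_equal_isPalindromeList : Prop := ∀ (head : List Int), Dom_isPalindromeList head → Spec_isPalindromeList head (isPalindromeList head)

-- ===== LEMMAS AND PROOFS =====

-- one step of the pop loop, with the queue written as first element, middle, last element
lemma pvPopLoop_cons_concat (a z : Int) (m : List Int) :
    pvPopLoop (a :: (m ++ [z])) = if a ≠ z then false else pvPopLoop m := by
  cases m with
  | nil => simp [pvPopLoop]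
  | cons c m' =>
      rw [show a :: ((c :: m') ++ [z]) = a :: c :: (m' ++ [z]) by simp]
      rw [pvPopLoop]
      have hd : (c :: (m' ++ [z])).dropLast = c :: m' := by
        rw [show c :: (m' ++ [z]) = (c :: m') ++ [z] by simp]
        exact List.dropLast_concat ..
      simp [hd]

-- the pop loop decides q = q.reverse
lemma pvPopLoop_eq_reverse (q : List Int) : pvPopLoop q = (q == q.reverse) := by
  induction hn : q.length using Nat.strong_induction_on generalizing q with
  | _ n ih =>
    match q with
    | [] => simp [pvPopLoop]
    | [x] => simp [pvPopLoop]
    | a :: b :: rest =>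
        obtain ⟨m, z, hmz⟩ := (List.eq_nil_or_concat (b :: rest)).resolve_left (by simp)
        rw [show a :: b :: rest = a :: (m ++ [z]) by rw [hmz]; simp]
        rw [pvPopLoop_cons_concat]
        have hrec : pvPopLoop m = (m == m.reverse) := by
          apply ih (m.length) _ m rfl
          subst hn
          have : (b :: rest).length = m.length + 1 := by rw [hmz]; simp
          simp [this]
        by_cases haz : a = z
        · subst haz
          rw [if_neg (by simp), hrec]
          simp
        · rw [if_pos haz]
          simp [haz]

-- ===== VERDICT (by name: the statement is the Claim_ definition above) =====
theorem isPalindromeList_spec : Claim_equal_isPalindromeList := by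
  intro head _
  unfold Spec_isPalindromeList isPalindromeList isPalindromeList_alt
  rw [PySem.List.slice?_none_none_neg_one]
  by_cases h : head = []
  · subst h; simp
  · rw [if_neg h]
    have hq : (PySem.List.pyRange 0 (PySem.List.len head) 1).foldl
        (fun q i => q ++ [PySem.List.pyGetD head i 0]) [] = head := by
      simp only [PySem.List.len_eq]
      rw [PySem.List.foldl_pyRange_zero_pyGetD' head 0 (fun acc x => acc ++ [x]) []]
      simpa using PySem.List.foldl_append_singleton head []
    simp only [hq, Option.getD_some]
    exact pvPopLoop_eq_reverse head
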